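-- pv_equiv track=rewrite | github.com/mstudiva/Urban-coral-population-genetics | scripts/concatFasta.py | assign_by_length
-- ===== SOURCE A (Python) =====
-- def assign_by_length(contigs, k):
--     """
--     Assign contigs to k bins to balance total lengths.
--     Greedy algorithm: largest contigs placed in the currently shortest bin.
--     """
--     bins = [[] for _ in range(k)]
--     lengths = [0] * k
--     sorted_contigs = sorted(contigs, key=lambda x: len(x[1]), reverse=True)
--     for contig in sorted_contigs:
--         i = min(range(k), key=lambda j: lengths[j])
--         bins[i].append(contig)
--         lengths[i] += len(contig[1])
--     return bins
-- ===== SOURCE B (Python) =====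
-- def assign_by_length(contigs, k):
--     """
--     Same greedy balancing, but instead of re-scanning all k bin loads for the
--     minimum on every contig, keep the (load, bin-index) pairs as a sorted
--     schedule: the front pair is always the shortest bin (lowest index on ties);
--     pop it, assign the contig, and re-insert the updated pair in order.
--     """
--     bins = [[] for _ in range(k)]
--     order = [(0, j) for j in range(k)]  # ascending (load, index); starts sorted
--     for contig in sorted(contigs, key=lambda x: len(x[1]), reverse=True):
--         load, j = order.pop(0)
--         bins[j].append(contig)
--         item = (load + len(contig[1]), j)
--         i = 0
--         while i < len(order) and order[i] <= item:
--             i += 1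
--         order.insert(i, item)
--     return bins
-- ===== Notes on version B (the rewrite author's own statement) =====
-- stated objective: alternative
-- what changed: B replaces A's per-contig rescan of all k bin loads (min over range(k)) by a sorted schedule of (load, bin) pairs: pop the front pair (shortest bin, lowest index on ties), assign, and re-insert the updated pair in sorted position, so the minimum is read in O(1) and only an ordered insertion is paid per contig.
import Mathlib
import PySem

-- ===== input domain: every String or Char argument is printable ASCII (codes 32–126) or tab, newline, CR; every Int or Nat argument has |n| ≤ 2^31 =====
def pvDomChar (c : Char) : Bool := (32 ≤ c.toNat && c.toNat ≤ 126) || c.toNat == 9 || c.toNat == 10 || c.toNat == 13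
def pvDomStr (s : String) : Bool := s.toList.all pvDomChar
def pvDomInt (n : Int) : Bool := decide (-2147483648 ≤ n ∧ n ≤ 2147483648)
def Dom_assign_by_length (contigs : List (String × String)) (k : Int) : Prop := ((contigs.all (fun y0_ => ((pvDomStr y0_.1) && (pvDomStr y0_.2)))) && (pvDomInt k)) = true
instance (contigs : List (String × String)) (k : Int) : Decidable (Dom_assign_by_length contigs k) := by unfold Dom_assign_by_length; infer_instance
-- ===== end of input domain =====

-- B replaces A's per-contig min-scan over all k bin loads by a sorted (load, index)
-- schedule (pop the front, re-insert the updated pair in order); same cost class,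
-- different mechanism ("alternative").

-- ===== PORT A =====
-- the loop body of A: i = min(range(k), key=lambda j: lengths[j]); bins[i].append(contig);
-- lengths[i] += len(contig[1]).  The .getD fallbacks are unreachable under Pre_.
def pvStepA (k : Int) (st : List (List (String × String)) × List Int)
    (contig : String × String) : List (List (String × String)) × List Int :=
  let i : Int := (PySem.List.min? (PySem.List.pyRange 0 k 1)
                    (fun j => PySem.List.pyGetD st.2 j 0)).getD 0
  (PySem.List.pySetD st.1 i (PySem.List.pyGetD st.1 i [] ++ [contig]),
   PySem.List.pySetD st.2 i (PySem.List.pyGetD st.2 i 0 + PySem.Str.len contig.2))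

def assign_by_length (contigs : List (String × String)) (k : Int) :
    List (List (String × String)) :=
  -- bins = [[] for _ in range(k)]; lengths = [0] * k
  let bins : List (List (String × String)) := (PySem.List.pyRange 0 k 1).map (fun _ => [])
  let lengths : List Int := List.replicate k.toNat 0
  let sorted_contigs := PySem.List.sorted contigs (fun x => PySem.Str.len x.2) true
  (sorted_contigs.foldl (pvStepA k) (bins, lengths)).1

-- ===== PORT B =====
-- 'order[i] <= item' on int pairs: Python's lexicographic tuple ≤ (exact)
def pvLexLeB (a b : Int × Int) : Bool := decide (a.1 < b.1 ∨ (a.1 = b.1 ∧ a.2 ≤ b.2))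

-- the scan 'i = 0; while i < len(order) and order[i] <= item: i += 1'
def pvInsPos (order : List (Int × Int)) (item : Int × Int) : Nat :=
  match order with
  | [] => 0
  | h :: t => if pvLexLeB h item then pvInsPos t item + 1 else 0

-- the loop body of B: load, j = order.pop(0); bins[j].append(contig);
-- order.insert(i, item).  The .getD fallback is unreachable under Pre_.
def pvStepB (st : List (List (String × String)) × List (Int × Int))
    (contig : String × String) : List (List (String × String)) × List (Int × Int) :=
  let p := (PySem.List.pop? st.2 0).getD (((0 : Int), (0 : Int)), [])
  let item : Int × Int := (p.1.1 + PySem.Str.len contig.2, p.1.2)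
  (PySem.List.pySetD st.1 p.1.2 (PySem.List.pyGetD st.1 p.1.2 [] ++ [contig]),
   PySem.List.insert p.2 ((pvInsPos p.2 item : Nat) : Int) item)

def assign_by_length_alt (contigs : List (String × String)) (k : Int) :
    List (List (String × String)) :=
  let bins : List (List (String × String)) := (PySem.List.pyRange 0 k 1).map (fun _ => [])
  let order : List (Int × Int) := (PySem.List.pyRange 0 k 1).map (fun j => (0, j))
  ((PySem.List.sorted contigs (fun x => PySem.Str.len x.2) true).foldl
    pvStepB (bins, order)).1

-- ===== PRECONDITION & SPEC =====
-- A raises ValueError (min of an empty range) — and B IndexError (pop from an empty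
-- schedule) — exactly when there is a contig but no bin; Pre_ excludes only that.
def Pre_assign_by_length (contigs : List (String × String)) (k : Int) : Prop :=
  contigs = [] ∨ 1 ≤ k

instance (contigs : List (String × String)) (k : Int) :
    Decidable (Pre_assign_by_length contigs k) := by
  unfold Pre_assign_by_length; infer_instance

def pvWitness_assign_by_length : (List (String × String)) × Int :=
  ([("a", "GGT"), ("b", "T"), ("c", "AC")], 2)

def Spec_assign_by_length (contigs : List (String × String)) (k : Int)
    (out : List (List (String × String))) : Prop := out = assign_by_length_alt contigs k
instance (contigs : List (String × String)) (k : Int) (out : List (List (String × String))) :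
    Decidable (Spec_assign_by_length contigs k out) := by
  unfold Spec_assign_by_length; infer_instance

-- ===== CLAIM (what is proved, stated in full; the proofs are below) =====
def Claim_equal_assign_by_length : Prop := ∀ (contigs : List (String × String)) (k : Int), Dom_assign_by_length contigs k → Pre_assign_by_length contigs k → Spec_assign_by_length contigs k (assign_by_length contigs k)

-- ===== LEMMAS AND PROOFS =====

-- Prop form of the pair order
def pvLexLe (a b : Int × Int) : Prop := a.1 < b.1 ∨ (a.1 = b.1 ∧ a.2 ≤ b.2)

-- the multiset of (load, bin index) pairs described by A's lengths table
def pvPairs (l : List Int) : List (Int × Int) :=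
  (List.range l.length).map (fun j => (l.getD j 0, (j : Int)))

-- B's schedule is a sorted arrangement of A's (load, index) pairs
def pvInv (l : List Int) (ord : List (Int × Int)) : Prop :=
  ord.Pairwise pvLexLe ∧ ord.Perm (pvPairs l)

theorem pvInv_def (l : List Int) (ord : List (Int × Int)) :
    pvInv l ord ↔ (ord.Pairwise pvLexLe ∧ ord.Perm (pvPairs l)) := Iff.rfl

theorem pvLexLeB_iff (a b : Int × Int) : pvLexLeB a b = true ↔ pvLexLe a b := by
  simp [pvLexLeB, pvLexLe]

theorem pvLexLe_total (a b : Int × Int) (h : ¬ pvLexLe a b) : pvLexLe b a := by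
  rcases a with ⟨a1, a2⟩; rcases b with ⟨b1, b2⟩
  simp only [pvLexLe] at h ⊢; omega

theorem pvLexLe_trans (a b c : Int × Int) (hab : pvLexLe a b) (hbc : pvLexLe b c) :
    pvLexLe a c := by
  rcases a with ⟨a1, a2⟩; rcases b with ⟨b1, b2⟩; rcases c with ⟨c1, c2⟩
  simp only [pvLexLe] at hab hbc ⊢; omega

theorem pvPairs_length (l : List Int) : (pvPairs l).length = l.length := by
  simp [pvPairs]

theorem mem_pvPairs (l : List Int) (q : Int × Int) :
    q ∈ pvPairs l ↔ ∃ j : Nat, j < l.length ∧ q = (l.getD j 0, (j : Int)) := by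
  simp only [pvPairs, List.mem_map, List.mem_range]
  constructor
  · rintro ⟨j, hj, rfl⟩; exact ⟨j, hj, rfl⟩
  · rintro ⟨j, hj, rfl⟩; exact ⟨j, hj, rfl⟩

theorem pvPairs_getElem (l : List Int) (t : Nat) (ht : t < (pvPairs l).length) :
    (pvPairs l)[t] = (l.getD t 0, (t : Int)) := by
  simp [pvPairs]

-- extracting position t of a list is a permutation move
theorem pvPerm_extract {α : Type} (a : List α) (t : Nat) (ht : t < a.length) :
    a.Perm (a[t] :: (a.take t ++ a.drop (t + 1))) := by
  conv_lhs => rw [← List.take_append_drop t a, ← List.getElem_cons_drop ht]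
  exact List.perm_middle

theorem pvPerm_set {α : Type} (a : List α) (t : Nat) (ht : t < a.length) (v : α) :
    (a.set t v).Perm (v :: (a.take t ++ a.drop (t + 1))) := by
  rw [List.set_eq_take_cons_drop v ht]
  exact List.perm_middle

theorem pvPairs_set (l : List Int) (t : Nat) (ht : t < l.length) (v : Int) :
    pvPairs (l.set t v) = (pvPairs l).set t (v, (t : Int)) := by
  apply List.ext_getElem
  · simp [pvPairs]
  · intro i h1 h2
    simp only [pvPairs, List.length_map, List.length_range, List.length_set] at h1 h2
    have hi : i < l.length := by simpa using h1
    simp only [pvPairs, List.getElem_set, List.getElem_map, List.getElem_range]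
    by_cases hit : t = i
    · subst hit
      have h5 : (l.set t v).getD t 0 = v := by
        rw [List.getD_eq_getElem _ _ (by simpa using ht), List.getElem_set]; simp
      rw [if_pos rfl, h5]
    · have h5 : (l.set t v).getD i 0 = l.getD i 0 := by
        rw [List.getD_eq_getElem _ _ (by simpa using hi), List.getElem_set,
            List.getD_eq_getElem _ _ hi]
        simp [hit]
      rw [if_neg hit, h5]

theorem pvInsPos_le (t : List (Int × Int)) (item : Int × Int) :
    pvInsPos t item ≤ t.length := by
  induction t with
  | nil => simp [pvInsPos]
  | cons h tl ih =>
    simp only [pvInsPos, List.length_cons]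
    split
    · omega
    · exact Nat.zero_le _

theorem pvInsSorted_perm (t : List (Int × Int)) (item : Int × Int) :
    (t.take (pvInsPos t item) ++ item :: t.drop (pvInsPos t item)).Perm (item :: t) := by
  have h := List.perm_middle (a := item) (l₁ := t.take (pvInsPos t item))
    (l₂ := t.drop (pvInsPos t item))
  simpa [List.take_append_drop] using h

theorem pvInsSorted_pairwise (t : List (Int × Int)) (item : Int × Int)
    (h : t.Pairwise pvLexLe) :
    (t.take (pvInsPos t item) ++ item :: t.drop (pvInsPos t item)).Pairwise pvLexLe := by
  induction t with
  | nil => simp [pvInsPos, pvLexLe]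
  | cons hd tl ih =>
    rcases List.pairwise_cons.mp h with ⟨hhd, htl⟩
    by_cases hb : pvLexLeB hd item = true
    · have hle : pvLexLe hd item := (pvLexLeB_iff hd item).mp hb
      simp only [pvInsPos, hb, if_true, List.take_succ_cons, List.drop_succ_cons,
        List.cons_append]
      refine List.pairwise_cons.mpr ⟨?_, ih htl⟩
      intro q hq
      rcases List.mem_append.mp hq with hq | hq
      · exact hhd _ (List.mem_of_mem_take hq)
      · rcases List.mem_cons.mp hq with rfl | hq
        · exact hle
        · exact hhd _ (List.mem_of_mem_drop hq)
    · have hgt : pvLexLe item hd :=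
        pvLexLe_total hd item (fun hc => hb ((pvLexLeB_iff hd item).mpr hc))
      simp only [pvInsPos, hb]
      refine List.pairwise_cons.mpr ⟨?_, h⟩
      intro q hq
      rcases List.mem_cons.mp hq with rfl | hq
      · exact hgt
      · exact pvLexLe_trans _ _ _ hgt (hhd _ hq)

-- the head of the sorted schedule is the pair of the first shortest bin
theorem pvHead_isFirst (l : List Int) (p : Int × Int) (rest : List (Int × Int))
    (hInv : pvInv l (p :: rest)) :
    ∃ t : Nat, t < l.length ∧ p = (l.getD t 0, (t : Int)) ∧
      (∀ j : Nat, j < l.length → pvLexLe p (l.getD j 0, (j : Int))) := by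
  obtain ⟨hpw, hperm⟩ := (pvInv_def l (p :: rest)).mp hInv
  have hpmem : p ∈ pvPairs l := hperm.mem_iff.mp (by simp)
  rcases (mem_pvPairs l p).mp hpmem with ⟨t, ht, hp⟩
  refine ⟨t, ht, hp, ?_⟩
  intro j hj
  have hqmem : (l.getD j 0, (j : Int)) ∈ p :: rest :=
    hperm.mem_iff.mpr ((mem_pvPairs l _).mpr ⟨j, hj, rfl⟩)
  rcases List.mem_cons.mp hqmem with hq | hq
  · rw [← hq]; right; exact ⟨rfl, le_refl _⟩
  · exact (List.pairwise_cons.mp hpw).1 _ hq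

-- A's min(range(n), key=lengths.__getitem__) as a foldl, characterised
theorem pvMinFold (l : List Int) :
    ∀ n : Nat, 0 < n → n ≤ l.length →
    ∃ t : Nat, t < n ∧
      (∀ j : Nat, j < t → l.getD t 0 < l.getD j 0) ∧
      (∀ j : Nat, t ≤ j → j < n → l.getD t 0 ≤ l.getD j 0) ∧
      PySem.List.min? (PySem.List.pyRange 0 (n : Int) 1)
        (fun j => PySem.List.pyGetD l j 0) = some (t : Int) := by
  intro n
  induction n with
  | zero => intro h; omega
  | succ n ih =>
    intro _ hlen
    by_cases hn : 0 < n
    · rcases ih hn (by omega) with ⟨t, htn, hstrict, hle, hfold⟩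
      have hsplit : PySem.List.pyRange 0 ((n + 1 : Nat) : Int) 1 =
          PySem.List.pyRange 0 (n : Int) 1 ++ [(n : Int)] := by
        have h := PySem.List.pyRange_one_succ_right
          (a := 0) (b := (n : Int)) (by exact_mod_cast Nat.zero_le n)
        push_cast
        rw [h]
      unfold PySem.List.min? at hfold ⊢
      rw [hsplit, List.foldl_append, hfold]
      simp only [List.foldl_cons, List.foldl_nil]
      beta_reduce
      simp only [PySem.List.pyGetD_natCast]
      by_cases hcmp : l.getD n 0 < l.getD t 0
      · refine ⟨n, by omega, ?_, ?_, by rw [if_pos hcmp]⟩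
        · intro j hj
          by_cases hjt : j < t
          · have := hstrict j hjt; omega
          · have := hle j (by omega) (by omega); omega
        · intro j h1 h2
          have hj : j = n := by omega
          subst hj; exact le_refl _
      · refine ⟨t, by omega, hstrict, ?_, by rw [if_neg hcmp]⟩
        intro j h1 h2
        by_cases hjn : j < n
        · exact hle j h1 hjn
        · have hj : j = n := by omega
          subst hj; omega
    · have hn1 : n = 0 := by omega
      subst hn1
      refine ⟨0, by omega, by intro j hj; omega, ?_, ?_⟩
      · intro j h1 h2
        have hj : j = 0 := by omega
        subst hj; exact le_refl _
      · have h1 : ((0 + 1 : Nat) : Int) = 1 := by norm_num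
        rw [h1, PySem.List.pyRange_one_cons (by norm_num),
          PySem.List.pyRange_one_eq_nil (by norm_num)]
        simp [PySem.List.min?]

theorem pvMin_eq (l : List Int) (t : Nat) (ht : t < l.length)
    (hmin : ∀ j : Nat, j < l.length →
      pvLexLe (l.getD t 0, (t : Int)) (l.getD j 0, (j : Int))) :
    PySem.List.min? (PySem.List.pyRange 0 (l.length : Int) 1)
      (fun j => PySem.List.pyGetD l j 0) = some (t : Int) := by
  rcases pvMinFold l l.length (by omega) (le_refl _) with ⟨t', ht', hstrict, hle, hfold⟩
  have htt : t' = t := by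
    have h1 := hmin t' ht'
    simp only [pvLexLe] at h1
    by_cases hlt : t < t'
    · have := hstrict t hlt; omega
    · by_cases hgt : t' < t
      · have := hle t (by omega) ht; omega
      · omega
  subst htt
  exact hfold

-- the initial schedule [(0, j) for j in range(k)] is a sorted arrangement
-- of the pairs of [0]*k
theorem pvInit_inv (k : Int) :
    pvInv (List.replicate k.toNat 0)
      ((PySem.List.pyRange 0 k 1).map (fun j => ((0 : Int), j))) := by
  have horder : (PySem.List.pyRange 0 k 1).map (fun j => ((0 : Int), j)) =
      (List.range k.toNat).map (fun j : Nat => ((0 : Int), (j : Int))) := by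
    rw [PySem.List.pyRange_one, List.map_map]
    simp
  rw [pvInv_def]
  constructor
  · rw [horder, List.pairwise_map]
    refine List.Pairwise.imp ?_ (List.pairwise_lt_range (n := k.toNat))
    intro a b hab
    refine Or.inr ⟨rfl, ?_⟩
    show ((a : Int)) ≤ (b : Int)
    exact_mod_cast Nat.le_of_lt hab
  · have heq : (List.range k.toNat).map (fun j : Nat => ((0 : Int), (j : Int))) =
        pvPairs (List.replicate k.toNat 0) := by
      unfold pvPairs
      rw [List.length_replicate]
      apply List.map_congr_left
      intro j hj
      rw [List.mem_range] at hj
      simp [hj]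
    rw [horder, heq]

-- one loop iteration: same bins, invariant preserved
theorem pvStep_eq (k : Int) (hk : 1 ≤ k) (bins : List (List (String × String)))
    (l : List Int) (ord : List (Int × Int)) (c : String × String)
    (hlen : l.length = k.toNat) (hInv : pvInv l ord) :
    (pvStepA k (bins, l) c).1 = (pvStepB (bins, ord) c).1 ∧
    (pvStepA k (bins, l) c).2.length = k.toNat ∧
    pvInv (pvStepA k (bins, l) c).2 (pvStepB (bins, ord) c).2 := by
  have hl0 : 0 < l.length := by omega
  obtain ⟨hpw, hperm⟩ := (pvInv_def l ord).mp hInv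
  have hordlen : ord.length = l.length := by
    rw [hperm.length_eq, pvPairs_length]
  cases ord with
  | nil => rw [List.length_nil] at hordlen; omega
  | cons p rest =>
    rcases pvHead_isFirst l p rest hInv with ⟨t, ht, hp, hmin⟩
    subst hp
    have hkl : ((l.length : Nat) : Int) = k := by
      rw [hlen]; exact Int.toNat_of_nonneg (by omega)
    have hminEq : PySem.List.min? (PySem.List.pyRange 0 k 1)
        (fun j => PySem.List.pyGetD l j 0) = some (t : Int) := by
      rw [← hkl]; exact pvMin_eq l t ht hmin
    have ht' : t < (pvPairs l).length := by rw [pvPairs_length]; exact ht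
    have hpwrest : rest.Pairwise pvLexLe := (List.pairwise_cons.mp hpw).2
    -- the schedule minus its head is the pair multiset minus position t
    have hR : rest.Perm ((pvPairs l).take t ++ (pvPairs l).drop (t + 1)) := by
      have h2 := pvPerm_extract (pvPairs l) t ht'
      rw [pvPairs_getElem l t ht'] at h2
      exact (hperm.trans h2).cons_inv
    have hnew : ∀ v : Int, (pvPairs (l.set t v)).Perm
        ((v, (t : Int)) :: ((pvPairs l).take t ++ (pvPairs l).drop (t + 1))) := by
      intro v
      rw [pvPairs_set l t ht v]
      exact pvPerm_set (pvPairs l) t ht' _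
    refine ⟨?_, ?_, ?_⟩
    · simp [pvStepA, pvStepB, hminEq]
    · simp only [pvStepA, hminEq, Option.getD_some, PySem.List.pySetD_natCast,
        List.length_set]
      exact hlen
    · rw [pvInv_def]
      simp only [pvStepA, pvStepB, hminEq, Option.getD_some, PySem.List.pop?_zero_cons,
        PySem.List.pySetD_natCast, PySem.List.pyGetD_natCast]
      rw [PySem.List.insert_natCast _ _ _ (pvInsPos_le rest _)]
      constructor
      · exact pvInsSorted_pairwise rest _ hpwrest
      · refine ((pvInsSorted_perm rest _).trans ?_).trans (hnew _).symm
        exact List.Perm.cons _ hR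

theorem pvFold_eq (k : Int) (hk : 1 ≤ k) :
    ∀ (cs : List (String × String)) (bins : List (List (String × String)))
      (l : List Int) (ord : List (Int × Int)),
      l.length = k.toNat → pvInv l ord →
      (cs.foldl (pvStepA k) (bins, l)).1 = (cs.foldl pvStepB (bins, ord)).1 := by
  intro cs
  induction cs with
  | nil => intro bins l ord _ _; rfl
  | cons c cs ih =>
    intro bins l ord hlen hInv
    rcases pvStep_eq k hk bins l ord c hlen hInv with ⟨h1, h2, h3⟩
    simp only [List.foldl_cons]
    calc (cs.foldl (pvStepA k) (pvStepA k (bins, l) c)).1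
        = (cs.foldl (pvStepA k)
            ((pvStepA k (bins, l) c).1, (pvStepA k (bins, l) c).2)).1 := by rfl
      _ = (cs.foldl pvStepB ((pvStepA k (bins, l) c).1, (pvStepB (bins, ord) c).2)).1 :=
          ih _ _ _ h2 h3
      _ = (cs.foldl pvStepB (pvStepB (bins, ord) c)).1 := by rw [h1]

-- ===== VERDICT (by name: the statement is the Claim_ definition above) =====
theorem assign_by_length_spec : Claim_equal_assign_by_length := by
  intro contigs k _ hpre
  unfold Spec_assign_by_length
  simp only [assign_by_length, assign_by_length_alt]
  rcases hpre with rfl | hk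
  · have h0 : PySem.List.sorted ([] : List (String × String))
        (fun x => PySem.Str.len x.2) true = [] :=
      (PySem.List.sorted_eq_nil_iff _ _ _).mpr rfl
    rw [h0]
    rfl
  · exact pvFold_eq k hk _ _ _ _ (by simp) (pvInit_inv k)
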